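-- pv_equiv track=rewrite | github.com/Ronchy2000/Python_Study | 数据结构与算法/A.蓝桥杯题目/打表法和模拟法/模拟方法.py | check
-- ===== SOURCE A (Python) =====
-- def check(a,b,c):
--     f = []
--     f.append(0)
--     while a!=0 :
--         if a%10 in f:
--             return False
--         else:
--             f.append(a%10)
--         if b % 10 in f:
--             return False
--         else:
--             f.append(b % 10)
--         if c%10 in f:
--             return False
--         else:
--             f.append(c%10)
--         a = int(a/10)
--         b = int(b/10)
--         c = int(c/10)
--     return True
-- ===== SOURCE B (Python) =====
-- def check(a, b, c):
--     # Recursively collect every peeled digit (digit of a, b, c per level, seed 0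
--     # at the base) and decide with one final distinctness test.
--     def digits(a, b, c):
--         if a == 0:
--             return [0]
--         return [a % 10, b % 10, c % 10] + digits(int(a / 10), int(b / 10), int(c / 10))
--     ds = digits(a, b, c)
--     return len(set(ds)) == len(ds)
-- ===== Notes on version B (the rewrite author's own statement) =====
-- stated objective: simpler
-- what changed: B replaces A's while-loop with three early-return membership tests against a growing list by a recursive pass that merely collects every peeled digit (seed 0 at the base) and decides everything with a single final len(set(ds)) == len(ds) distinctness check.
import Mathlib
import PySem

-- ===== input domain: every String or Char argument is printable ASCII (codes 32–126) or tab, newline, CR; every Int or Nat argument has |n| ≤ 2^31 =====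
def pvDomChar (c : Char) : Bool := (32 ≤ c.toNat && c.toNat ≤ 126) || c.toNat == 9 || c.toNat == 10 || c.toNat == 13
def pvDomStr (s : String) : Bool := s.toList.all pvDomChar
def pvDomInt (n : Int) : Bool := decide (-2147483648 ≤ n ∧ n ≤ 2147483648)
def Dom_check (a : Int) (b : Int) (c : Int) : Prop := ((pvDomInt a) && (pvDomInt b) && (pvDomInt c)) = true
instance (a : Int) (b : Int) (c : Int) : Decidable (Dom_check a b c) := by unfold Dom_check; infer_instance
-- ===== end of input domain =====

-- B replaces A's early-return membership loop by a recursive collect-all-digits pass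
-- followed by ONE final distinctness test (objective: simpler decomposition).

-- Python's int(x/10); PySem.Int.truncdiv is exact for |x| < 2^53, hence on Dom_check.
-- Termination helper cited by the decreasing_by of all digit-peeling recursions below.
theorem pvTdiv10_lt (a : Int) (h : a ≠ 0) : (PySem.Int.truncdiv a 10).natAbs < a.natAbs := by
  simp only [PySem.Int.truncdiv, Int.natAbs_tdiv]
  exact Nat.div_lt_self (by omega) (by norm_num)

-- ===== PORT A =====
-- the while-loop of A, with f the list built by f.append; returns mid-loop on a repeat
def checkGo (f : List Int) (a b c : Int) : Bool :=
  if h : a = 0 then true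
  else
    if PySem.Int.mod a 10 ∈ f then false
    else
      let f1 := f ++ [PySem.Int.mod a 10]
      if PySem.Int.mod b 10 ∈ f1 then false
      else
        let f2 := f1 ++ [PySem.Int.mod b 10]
        if PySem.Int.mod c 10 ∈ f2 then false
        else
          checkGo (f2 ++ [PySem.Int.mod c 10])
            (PySem.Int.truncdiv a 10) (PySem.Int.truncdiv b 10) (PySem.Int.truncdiv c 10)
  termination_by a.natAbs
  decreasing_by exact pvTdiv10_lt a h

def check (a : Int) (b : Int) (c : Int) : Bool := checkGo [0] a b c

-- ===== PORT B =====
-- the inner recursive digits(a, b, c) of Source B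
def digitsB (a b c : Int) : List Int :=
  if h : a = 0 then [0]
  else
    [PySem.Int.mod a 10, PySem.Int.mod b 10, PySem.Int.mod c 10] ++
      digitsB (PySem.Int.truncdiv a 10) (PySem.Int.truncdiv b 10) (PySem.Int.truncdiv c 10)
  termination_by a.natAbs
  decreasing_by exact pvTdiv10_lt a h

def check_alt (a : Int) (b : Int) (c : Int) : Bool :=
  let ds := digitsB a b c
  PySem.Set.len (PySem.Set.ofList ds) == (ds.length : Int)

-- ===== PRECONDITION & SPEC =====
def Spec_check (a : Int) (b : Int) (c : Int) (out : Bool) : Prop := out = check_alt a b c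
instance (a : Int) (b : Int) (c : Int) (out : Bool) : Decidable (Spec_check a b c out) := by
  unfold Spec_check; infer_instance

-- ===== CLAIM (what is proved, stated in full; the proofs are below) =====
def Claim_equal_check : Prop := ∀ (a : Int) (b : Int) (c : Int), Dom_check a b c → Spec_check a b c (check a b c)


-- ===== LEMMAS AND PROOFS =====

-- the digits A's loop appends after the seed 0 (in order)
def tailDigits (a b c : Int) : List Int :=
  if h : a = 0 then []
  else
    PySem.Int.mod a 10 :: PySem.Int.mod b 10 :: PySem.Int.mod c 10 ::
      tailDigits (PySem.Int.truncdiv a 10) (PySem.Int.truncdiv b 10) (PySem.Int.truncdiv c 10)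
  termination_by a.natAbs
  decreasing_by exact pvTdiv10_lt a h

theorem digitsB_eq_tail (a b c : Int) : digitsB a b c = tailDigits a b c ++ [0] := by
  induction a, b, c using tailDigits.induct with
  | case1 b c => rw [digitsB, tailDigits]; simp
  | case2 a b c h ih => rw [digitsB, tailDigits]; simp [h, ih]

-- loop invariant of A: with a duplicate-free f, the loop succeeds iff the seed list
-- together with all digits still to be appended is duplicate-free
theorem checkGo_iff (a b c : Int) :
    ∀ f : List Int, f.Nodup → (checkGo f a b c = true ↔ (f ++ tailDigits a b c).Nodup) := by
  induction a, b, c using tailDigits.induct with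
  | case1 b c =>
    intro f hf
    rw [checkGo, tailDigits]
    simp [hf]
  | case2 a b c h ih =>
    intro f hf
    rw [checkGo, tailDigits]
    simp only [dif_neg h]
    split_ifs with h1 h2 h3
    · simp only [false_iff]
      intro hnd
      rw [List.nodup_append] at hnd
      exact hnd.2.2 _ h1 _ (by simp) rfl
    · simp only [false_iff]
      intro hnd
      rw [List.nodup_append] at hnd
      rcases List.mem_append.1 h2 with hb | hb
      · exact hnd.2.2 _ hb _ (by simp) rfl
      · simp only [List.mem_singleton] at hb
        refine (List.nodup_cons.1 hnd.2.1).1 ?_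
        rw [← hb]
        exact List.mem_cons_self
    · simp only [false_iff]
      intro hnd
      rw [List.nodup_append] at hnd
      rcases List.mem_append.1 h3 with hc | hc
      · rcases List.mem_append.1 hc with hc | hc
        · exact hnd.2.2 _ hc _ (by simp) rfl
        · simp only [List.mem_singleton] at hc
          refine (List.nodup_cons.1 hnd.2.1).1 ?_
          rw [← hc]
          exact List.mem_cons_of_mem _ List.mem_cons_self
      · simp only [List.mem_singleton] at hc
        refine (List.nodup_cons.1 (List.nodup_cons.1 hnd.2.1).2).1 ?_
        rw [← hc]
        exact List.mem_cons_self
    · have h2' : PySem.Int.mod b 10 ∉ f ∧ PySem.Int.mod b 10 ≠ PySem.Int.mod a 10 := by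
        simpa using h2
      have h3' : PySem.Int.mod c 10 ∉ f ∧ PySem.Int.mod c 10 ≠ PySem.Int.mod a 10 ∧
          PySem.Int.mod c 10 ≠ PySem.Int.mod b 10 := by
        simpa using h3
      have hnodup : (f ++ [PySem.Int.mod a 10] ++ [PySem.Int.mod b 10] ++ [PySem.Int.mod c 10]).Nodup := by
        simp only [List.append_assoc, List.singleton_append]
        rw [List.nodup_append]
        refine ⟨hf, ?_, ?_⟩
        · show (PySem.Int.mod a 10 :: PySem.Int.mod b 10 :: PySem.Int.mod c 10 :: []).Nodup
          refine List.nodup_cons.2 ⟨?_, List.nodup_cons.2 ⟨?_, by simp⟩⟩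
          · simp only [List.mem_cons, List.not_mem_nil, or_false, not_or]
            exact ⟨fun e => h2'.2 e.symm, fun e => h3'.2.1 e.symm⟩
          · simp only [List.mem_cons, List.not_mem_nil, or_false]
            exact fun e => h3'.2.2 e.symm
        · intro x hx y hy
          simp only [List.mem_append, List.mem_cons, List.not_mem_nil, or_false] at hy
          rcases hy with (rfl | rfl) | rfl
          · exact fun e => h1 (e ▸ hx)
          · exact fun e => h2'.1 (e ▸ hx)
          · exact fun e => h3'.1 (e ▸ hx)
      rw [ih _ hnodup]
      simp only [List.append_assoc, List.cons_append, List.nil_append]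

-- Source B's final test: len(set(ds)) == len(ds) decides duplicate-freeness
theorem len_ofList_eq_iff_nodup (xs : List Int) :
    ((PySem.Set.ofList xs).length = xs.length) ↔ xs.Nodup := by
  induction xs with
  | nil => simp [PySem.Set.ofList_nil]
  | cons x xs ih =>
    rw [PySem.Set.ofList_cons]
    by_cases hx : x ∈ xs
    · have hx' : x ∈ PySem.Set.ofList xs := (PySem.Set.mem_ofList xs x).2 hx
      have hlt : (PySem.Set.discard (PySem.Set.ofList xs) x).length < (PySem.Set.ofList xs).length := by
        rw [PySem.Set.discard, List.length_filter_lt_length_iff_exists]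
        exact ⟨x, hx', by simp⟩
      have hle : (PySem.Set.ofList xs).length ≤ xs.length := PySem.Set.length_ofList_le xs
      simp only [List.length_cons, List.nodup_cons]
      constructor
      · intro hlen; omega
      · intro hnd; exact absurd hx hnd.1
    · have hfix : PySem.Set.discard (PySem.Set.ofList xs) x = PySem.Set.ofList xs := by
        rw [PySem.Set.discard]
        apply List.filter_eq_self.mpr
        intro y hy
        have hyx := (PySem.Set.mem_ofList xs y).1 hy
        simp only [Bool.not_eq_true', beq_eq_false_iff_ne]
        exact fun e => hx (e ▸ hyx)
      rw [hfix]
      simp [List.nodup_cons, hx, ih]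

theorem check_iff (a b c : Int) : check a b c = true ↔ (digitsB a b c).Nodup := by
  rw [check, checkGo_iff a b c [0] (by simp), digitsB_eq_tail]
  exact List.perm_append_comm.nodup_iff

theorem check_alt_iff (a b c : Int) : check_alt a b c = true ↔ (digitsB a b c).Nodup := by
  rw [check_alt]
  simp only [PySem.Set.len, beq_iff_eq, Nat.cast_inj]
  exact len_ofList_eq_iff_nodup _

-- ===== VERDICT (by name: the statement is the Claim_ definition above) =====
theorem check_spec : Claim_equal_check := by
  intro a b c _
  show check a b c = check_alt a b c
  rw [Bool.eq_iff_iff, check_iff, check_alt_iff]
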